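-- pv_equiv track=rewrite | github.com/Aniketps4/Reddit_profile_analysis | generated_wordfile.py | analyze_text_for_themes
-- ===== SOURCE A (Python) =====
-- from collections import defaultdict
--
-- def analyze_text_for_themes(texts):
--     """Simulate LLM to extract key themes and generate a custom quote."""
--     themes = defaultdict(int)
--     theme_keywords = {
--         "business": ["business", "work", "professional"],
--         "location": ["lucknow", "lko", "delhi", "city"],
--         "health": ["healthy", "cook", "diet", "meal", "nutrition"],
--         "law": ["cop", "fine", "bribe", "law"],
--         "community": ["discuss", "lucknow", "delhi"]
--     }
--
--     all_text = " ".join(t.get("body", t.get("title", "")) for t in texts if isinstance(t.get("body", t.get("title", "")), str)).lower()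
--     for theme, keywords in theme_keywords.items():
--         if any(k in all_text for k in keywords):
--             themes[theme] += 1
--
--     dominant_theme = max(themes, key=themes.get, default="health")
--     quotes = {
--         "business": "I aim to grow my career and business opportunities.",
--         "location": "I want to explore and adapt to my new surroundings.",
--         "health": "I want to improve my health and dietary habits.",
--         "law": "I seek fair treatment in my daily life.",
--         "community": "I enjoy connecting with my community."
--     }
--     return quotes.get(dominant_theme, "I want to improve my life experience.")
-- ===== SOURCE B (Python) =====
-- def analyze_text_for_themes(texts):
--     """Simulate LLM to extract key themes and generate a custom quote."""
--     all_text = " ".join(t.get("body", t.get("title", "")) for t in texts if isinstance(t.get("body", t.get("title", "")), str)).lower()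
--     table = [
--         (["business", "work", "professional"], "I aim to grow my career and business opportunities."),
--         (["lucknow", "lko", "delhi", "city"], "I want to explore and adapt to my new surroundings."),
--         (["healthy", "cook", "diet", "meal", "nutrition"], "I want to improve my health and dietary habits."),
--         (["cop", "fine", "bribe", "law"], "I seek fair treatment in my daily life."),
--         (["discuss", "lucknow", "delhi"], "I enjoy connecting with my community."),
--     ]
--     for keywords, quote in table:
--         if any(k in all_text for k in keywords):
--             return quote
--     return "I want to improve my health and dietary habits."
-- ===== Notes on version B (the rewrite author's own statement) =====
-- stated objective: simpler
-- what changed: Replaces the defaultdict counting table plus max-argmax plus quotes lookup with a single ordered (keywords, quote) table scanned once, returning the first theme whose keyword occurs (ties and the empty case coincide with max's first-maximal / default behaviour).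
import Mathlib
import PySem

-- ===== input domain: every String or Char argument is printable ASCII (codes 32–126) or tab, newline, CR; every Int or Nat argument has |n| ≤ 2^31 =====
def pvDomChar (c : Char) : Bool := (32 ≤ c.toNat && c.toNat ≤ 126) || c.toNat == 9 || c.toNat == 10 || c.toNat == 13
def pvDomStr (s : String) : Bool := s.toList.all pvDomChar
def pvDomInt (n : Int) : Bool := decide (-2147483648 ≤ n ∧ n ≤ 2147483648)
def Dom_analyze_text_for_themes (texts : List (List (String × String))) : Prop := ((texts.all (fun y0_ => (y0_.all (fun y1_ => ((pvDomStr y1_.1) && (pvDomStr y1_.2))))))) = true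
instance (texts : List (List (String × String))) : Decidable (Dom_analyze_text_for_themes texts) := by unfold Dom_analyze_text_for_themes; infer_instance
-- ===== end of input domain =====

-- B replaces A's defaultdict count table + max argmax + quotes lookup with one ordered
-- (keywords, quote) table and a first-match scan; same result, simpler decomposition.


-- ===== PORT A =====
-- all_text as both Pythons compute it identically (the `isinstance(..., str)` filter is
-- always true under the type convention — every dict value is a String — so it keeps all items)
def pvAllText (texts : List (List (String × String))) : String :=
  PySem.Str.lower (PySem.Str.join " " (texts.map (fun t =>
    PySem.Dict.getD (PySem.Dict.ofList t) "body" (PySem.Dict.getD (PySem.Dict.ofList t) "title" ""))))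

def pvThemeKeywords : List (String × List String) :=
  [("business", ["business", "work", "professional"]),
   ("location", ["lucknow", "lko", "delhi", "city"]),
   ("health", ["healthy", "cook", "diet", "meal", "nutrition"]),
   ("law", ["cop", "fine", "bribe", "law"]),
   ("community", ["discuss", "lucknow", "delhi"])]

def pvQuotes : PySem.Dict String String :=
  PySem.Dict.ofList
    [("business", "I aim to grow my career and business opportunities."),
     ("location", "I want to explore and adapt to my new surroundings."),
     ("health", "I want to improve my health and dietary habits."),
     ("law", "I seek fair treatment in my daily life."),
     ("community", "I enjoy connecting with my community.")]

-- the body of A after all_text is built (themes loop, argmax, quotes lookup)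
def pvPickA (all_text : String) : String :=
  let themes : PySem.Dict String Int :=
    pvThemeKeywords.foldl
      (fun d p => if p.2.any (fun k => PySem.Str.isIn k all_text) then d.modify p.1 0 (· + 1) else d)
      PySem.Dict.empty
  let dominant_theme := PySem.List.maxD themes.keys (fun k => themes.getD k 0) "health"
  pvQuotes.getD dominant_theme "I want to improve my life experience."

def analyze_text_for_themes (texts : List (List (String × String))) : String :=
  pvPickA (pvAllText texts)

-- ===== PORT B =====
def pvTable : List (List String × String) :=
  [(["business", "work", "professional"], "I aim to grow my career and business opportunities."),
   (["lucknow", "lko", "delhi", "city"], "I want to explore and adapt to my new surroundings."),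
   (["healthy", "cook", "diet", "meal", "nutrition"], "I want to improve my health and dietary habits."),
   (["cop", "fine", "bribe", "law"], "I seek fair treatment in my daily life."),
   (["discuss", "lucknow", "delhi"], "I enjoy connecting with my community.")]

-- the body of B after all_text is built: first-match scan over the table
def pvPickB (all_text : String) : String :=
  match pvTable.find? (fun p => p.1.any (fun k => PySem.Str.isIn k all_text)) with
  | some p => p.2
  | none => "I want to improve my health and dietary habits."

def analyze_text_for_themes_alt (texts : List (List (String × String))) : String :=
  pvPickB (pvAllText texts)

-- ===== PRECONDITION & SPEC =====
def Spec_analyze_text_for_themes (texts : List (List (String × String))) (out : String) : Prop := out = analyze_text_for_themes_alt texts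
instance (texts : List (List (String × String))) (out : String) : Decidable (Spec_analyze_text_for_themes texts out) := by unfold Spec_analyze_text_for_themes; infer_instance

-- ===== CLAIM (what is proved, stated in full; the proofs are below) =====
def Claim_equal_analyze_text_for_themes : Prop := ∀ (texts : List (List (String × String))), Dom_analyze_text_for_themes texts → Spec_analyze_text_for_themes texts (analyze_text_for_themes texts)

-- ===== LEMMAS AND PROOFS =====

-- Both results depend only on the five booleans "some keyword of theme i occurs in all_text";
-- fixing them closes both terms, and the 32 cases are decided by computation.
theorem pvPick_eq (s : String) : pvPickA s = pvPickB s := by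
  unfold pvPickA pvPickB pvThemeKeywords pvTable
  cases h1 : ["business", "work", "professional"].any (fun k => PySem.Str.isIn k s) <;>
  cases h2 : ["lucknow", "lko", "delhi", "city"].any (fun k => PySem.Str.isIn k s) <;>
  cases h3 : ["healthy", "cook", "diet", "meal", "nutrition"].any (fun k => PySem.Str.isIn k s) <;>
  cases h4 : ["cop", "fine", "bribe", "law"].any (fun k => PySem.Str.isIn k s) <;>
  cases h5 : ["discuss", "lucknow", "delhi"].any (fun k => PySem.Str.isIn k s) <;>
    simp only [List.foldl, List.find?, h1, h2, h3, h4, h5] <;> decide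

-- ===== VERDICT (by name: the statement is the Claim_ definition above) =====
theorem analyze_text_for_themes_spec : Claim_equal_analyze_text_for_themes := by
  intro texts _
  unfold Spec_analyze_text_for_themes analyze_text_for_themes analyze_text_for_themes_alt
  exact pvPick_eq (pvAllText texts)
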